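-- pv_equiv track=rewrite | github.com/Uxinnn/Advent-of-Code | day19/day19.py | get_directions
-- ===== SOURCE A (Python) =====
-- from copy import deepcopy
--
-- def rotate_90(direction, scanner):
--     rotation = set()
--     if direction == "x":
--         rotation = set([(point[0], point[2], -point[1]) for point in scanner])
--     elif direction == "y":
--         rotation = set([(point[2], point[1], -point[0]) for point in scanner])
--     elif direction == "z":
--         rotation = set([(point[1], -point[0], point[2]) for point in scanner])
--     return rotation
--
-- def get_directions(scanner):
--     directions = [deepcopy(scanner), rotate_90("y", scanner)]
--     direction = directions[1]
--     for i in range(3):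
--         direction = rotate_90("z", direction)
--         directions.append(direction)
--     directions.append(rotate_90("y", directions[1]))
--     return directions
-- ===== SOURCE B (Python) =====
-- def get_directions(scanner):
--     maps = [
--         lambda x, y, z: (z, y, -x),    # Y
--         lambda x, y, z: (y, -z, -x),   # Z.Y
--         lambda x, y, z: (-z, -y, -x),  # Z.Z.Y
--         lambda x, y, z: (-y, z, -x),   # Z.Z.Z.Y
--         lambda x, y, z: (-x, y, -z),   # Y.Y
--     ]
--     return [[list(p) for p in scanner]] + [
--         {m(p[0], p[1], p[2]) for p in scanner} for m in maps
--     ]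
-- ===== Notes on version B (the rewrite author's own statement) =====
-- stated objective: simpler
-- what changed: B replaces the stateful chain of rotate_90('z', ...) calls over previously built sets by five independent precomposed coordinate maps applied directly to the original scanner.
import Mathlib
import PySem

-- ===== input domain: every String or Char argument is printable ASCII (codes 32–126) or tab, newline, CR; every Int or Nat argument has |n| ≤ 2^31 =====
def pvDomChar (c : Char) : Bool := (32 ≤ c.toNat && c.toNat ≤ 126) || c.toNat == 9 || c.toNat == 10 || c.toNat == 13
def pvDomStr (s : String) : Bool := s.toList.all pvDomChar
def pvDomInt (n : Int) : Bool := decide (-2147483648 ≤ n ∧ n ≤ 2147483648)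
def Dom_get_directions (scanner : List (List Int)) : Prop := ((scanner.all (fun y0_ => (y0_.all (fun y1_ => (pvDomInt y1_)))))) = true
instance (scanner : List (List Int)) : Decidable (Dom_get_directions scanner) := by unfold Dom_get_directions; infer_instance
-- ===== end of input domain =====

-- B replaces A's stateful chain of rotate_90('z', ·) calls over previously built sets by five
-- independent precomposed coordinate maps applied directly to the input list (objective: simpler).


-- ===== PORT A =====
def rotate_90 (direction : String) (scanner : List (List Int)) : PySem.Set (List Int) :=
  let rotation : PySem.Set (List Int) := PySem.Set.empty
  if direction = "x" then
    PySem.Set.ofList (scanner.map (fun p =>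
      [PySem.List.pyGetD p 0 0, PySem.List.pyGetD p 2 0, -(PySem.List.pyGetD p 1 0)]))
  else if direction = "y" then
    PySem.Set.ofList (scanner.map (fun p =>
      [PySem.List.pyGetD p 2 0, PySem.List.pyGetD p 1 0, -(PySem.List.pyGetD p 0 0)]))
  else if direction = "z" then
    PySem.Set.ofList (scanner.map (fun p =>
      [PySem.List.pyGetD p 1 0, -(PySem.List.pyGetD p 0 0), PySem.List.pyGetD p 2 0]))
  else rotation

def get_directions (scanner : List (List Int)) : List (List (List Int)) :=
  let directions : List (List (List Int)) := [scanner, rotate_90 "y" scanner]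
  let direction := PySem.List.pyGetD directions 1 []
  let st := (PySem.List.pyRange 0 3 1).foldl
    (fun (st : List (List (List Int)) × List (List Int)) _ =>
      let d := rotate_90 "z" st.2
      (st.1 ++ [d], d)) (directions, direction)
  st.1 ++ [rotate_90 "y" (PySem.List.pyGetD st.1 1 [])]

-- ===== PORT B =====
def get_directions_alt (scanner : List (List Int)) : List (List (List Int)) :=
  let maps : List (Int → Int → Int → List Int) :=
    [fun x y z => [z, y, -x],
     fun x y z => [y, -z, -x],
     fun x y z => [-z, -y, -x],
     fun x y z => [-y, z, -x],
     fun x y z => [-x, y, -z]]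
  [scanner.map (fun p => p)] ++ maps.map (fun m =>
    PySem.Set.ofList (scanner.map (fun p =>
      m (PySem.List.pyGetD p 0 0) (PySem.List.pyGetD p 1 0) (PySem.List.pyGetD p 2 0))))

-- ===== PRECONDITION & SPEC =====
-- Pre_ excludes exactly the inputs on which the Python A raises IndexError: a point with fewer
-- than 3 coordinates makes point[2] (or point[0]/point[1]) fail inside rotate_90.
def Pre_get_directions (scanner : List (List Int)) : Prop := ∀ p ∈ scanner, 3 ≤ p.length
instance (scanner : List (List Int)) : Decidable (Pre_get_directions scanner) := by
  unfold Pre_get_directions; infer_instance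
def pvWitness_get_directions : List (List Int) := [[1, 2, 3], [0, -1, 5]]
def Spec_get_directions (scanner : List (List Int)) (out : List (List (List Int))) : Prop := out = get_directions_alt scanner
instance (scanner : List (List Int)) (out : List (List (List Int))) : Decidable (Spec_get_directions scanner out) := by unfold Spec_get_directions; infer_instance

-- ===== CLAIM (what is proved, stated in full; the proofs are below) =====
def Claim_equal_get_directions : Prop := ∀ (scanner : List (List Int)), Dom_get_directions scanner → Pre_get_directions scanner → Spec_get_directions scanner (get_directions scanner)

-- ===== LEMMAS AND PROOFS =====

-- the two coordinate maps A's rotate_90 applies ("y" and "z"), on the List Int encoding of points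
def pvFy (p : List Int) : List Int := [PySem.List.pyGetD p 2 0, PySem.List.pyGetD p 1 0, -(PySem.List.pyGetD p 0 0)]
def pvFz (p : List Int) : List Int := [PySem.List.pyGetD p 1 0, -(PySem.List.pyGetD p 0 0), PySem.List.pyGetD p 2 0]

theorem pv_add_map (f : List Int → List Int) (s : List (List Int)) (x : List Int)
    (h : ∀ a ∈ s, f a = f x → a = x) :
    PySem.Set.add (s.map f) (f x) = (PySem.Set.add s x).map f := by
  have hmem : f x ∈ s.map f ↔ x ∈ s := by
    constructor
    · intro hm
      rcases List.mem_map.mp hm with ⟨a, ha, hfa⟩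
      exact h a ha hfa ▸ ha
    · exact List.mem_map_of_mem
  by_cases hx : x ∈ s
  · simp [PySem.Set.add, PySem.Set.contains, hx, hmem.mpr hx]
  · have : f x ∉ s.map f := fun hm => hx (hmem.mp hm)
    simp [PySem.Set.add, PySem.Set.contains, hx, this]

theorem pv_foldl_add_map (f : List Int → List Int) (l s : List (List Int))
    (hinj : ∀ a b, (a ∈ s ∨ a ∈ l) → b ∈ l → f a = f b → a = b) :
    List.foldl PySem.Set.add (s.map f) (l.map f) = (List.foldl PySem.Set.add s l).map f := by
  induction l generalizing s with
  | nil => simp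
  | cons x t ih =>
    simp only [List.map_cons, List.foldl_cons]
    rw [pv_add_map f s x (fun a ha => hinj a x (Or.inl ha) (List.mem_cons_self) )]
    refine ih (PySem.Set.add s x) (fun a b ha hb => hinj a b ?_ (List.mem_cons_of_mem _ hb))
    rcases ha with h1 | h1
    · rcases (PySem.Set.mem_add s x a).mp h1 with h2 | h2
      · exact Or.inl h2
      · exact Or.inr (h2 ▸ List.mem_cons_self)
    · exact Or.inr (List.mem_cons_of_mem _ h1)

-- set(map(f, xs)) = map(f, set(xs)) exactly (same order) when f is injective on xs
theorem pv_ofList_map (f : List Int → List Int) (l : List (List Int))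
    (hinj : ∀ a ∈ l, ∀ b ∈ l, f a = f b → a = b) :
    PySem.Set.ofList (l.map f) = (PySem.Set.ofList l).map f := by
  rw [PySem.Set.ofList_eq_foldl, PySem.Set.ofList_eq_foldl]
  have := pv_foldl_add_map f l []
    (fun a b ha hb => hinj a (ha.resolve_left (by simp)) b hb)
  simpa using this

theorem pv_foldl_add_nodup (s t : List (List Int)) (hn : s.Nodup)
    (hd : ∀ a ∈ s, a ∉ t) : List.foldl PySem.Set.add t s = t ++ s := by
  induction s generalizing t with
  | nil => simp
  | cons x r ih =>
    have hx : x ∉ t := hd x List.mem_cons_self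
    have : PySem.Set.add t x = t ++ [x] := by
      simp [PySem.Set.add, PySem.Set.contains, hx]
    rw [List.foldl_cons, this, ih (t ++ [x]) (List.Nodup.of_cons hn) (fun a ha => by
      intro hmem
      rcases List.mem_append.mp hmem with h1 | h1
      · exact hd a (List.mem_cons_of_mem _ ha) h1
      · rcases List.mem_singleton.mp h1 with rfl
        exact (List.nodup_cons.mp hn).1 ha)]
    simp

theorem pv_ofList_nodup (s : List (List Int)) (hn : s.Nodup) : PySem.Set.ofList s = s := by
  rw [PySem.Set.ofList_eq_foldl]
  simpa using pv_foldl_add_nodup s [] hn (by simp)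

theorem pv_shape_map (f : List Int → List Int) (hf : ∀ p, ∃ a b c, f p = [a,b,c])
    (X : List (List Int)) : ∀ q ∈ X.map f, ∃ a b c, q = [a,b,c] := by
  intro q hq
  rcases List.mem_map.mp hq with ⟨p, _, rfl⟩
  exact hf p

theorem pv_shape_fy (p : List Int) : ∃ a b c, pvFy p = [a,b,c] := ⟨_, _, _, rfl⟩
theorem pv_shape_fz (p : List Int) : ∃ a b c, pvFz p = [a,b,c] := ⟨_, _, _, rfl⟩

theorem pv_injz (X : List (List Int)) (hX : ∀ q ∈ X, ∃ a b c, q = [a,b,c]) :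
    ∀ a ∈ X, ∀ b ∈ X, pvFz a = pvFz b → a = b := by
  intro a ha b hb h
  rcases hX a ha with ⟨a1, a2, a3, rfl⟩
  rcases hX b hb with ⟨b1, b2, b3, rfl⟩
  have h' : ([a2, -a1, a3] : List Int) = [b2, -b1, b3] := h
  simp only [List.cons.injEq] at h'
  simp [h'.1, h'.2.2.1, neg_inj.mp h'.2.1]

theorem pv_injy (X : List (List Int)) (hX : ∀ q ∈ X, ∃ a b c, q = [a,b,c]) :
    ∀ a ∈ X, ∀ b ∈ X, pvFy a = pvFy b → a = b := by
  intro a ha b hb h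
  rcases hX a ha with ⟨a1, a2, a3, rfl⟩
  rcases hX b hb with ⟨b1, b2, b3, rfl⟩
  have h' : ([a3, a2, -a1] : List Int) = [b3, b2, -b1] := h
  simp only [List.cons.injEq] at h'
  simp [h'.1, h'.2.1, neg_inj.mp h'.2.2.1]

-- set(map(f, set(X))) = set(map(f, X)) as lists, for f injective on X
theorem pv_collapse (f : List Int → List Int) (X : List (List Int))
    (hinj : ∀ a ∈ X, ∀ b ∈ X, f a = f b → a = b) :
    PySem.Set.ofList ((PySem.Set.ofList X).map f) = PySem.Set.ofList (X.map f) := by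
  rw [← pv_ofList_map f X hinj, pv_ofList_nodup _ (PySem.Set.nodup_ofList _)]

theorem pv_unfold_A (scanner : List (List Int)) :
    get_directions scanner =
      [scanner,
       PySem.Set.ofList (scanner.map pvFy),
       PySem.Set.ofList ((PySem.Set.ofList (scanner.map pvFy)).map pvFz),
       PySem.Set.ofList ((PySem.Set.ofList ((PySem.Set.ofList (scanner.map pvFy)).map pvFz)).map pvFz),
       PySem.Set.ofList ((PySem.Set.ofList ((PySem.Set.ofList ((PySem.Set.ofList (scanner.map pvFy)).map pvFz)).map pvFz)).map pvFz),
       PySem.Set.ofList ((PySem.Set.ofList (scanner.map pvFy)).map pvFy)] := rfl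

theorem pv_unfold_B (scanner : List (List Int)) :
    get_directions_alt scanner =
      [scanner.map (fun p => p),
       PySem.Set.ofList (scanner.map pvFy),
       PySem.Set.ofList (scanner.map (fun p => pvFz (pvFy p))),
       PySem.Set.ofList (scanner.map (fun p => pvFz (pvFz (pvFy p)))),
       PySem.Set.ofList (scanner.map (fun p =>
         [-(PySem.List.pyGetD p 1 0), PySem.List.pyGetD p 2 0, -(PySem.List.pyGetD p 0 0)])),
       PySem.Set.ofList (scanner.map (fun p => pvFy (pvFy p)))] := rfl

theorem pv_main (scanner : List (List Int)) :
    [scanner,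
       PySem.Set.ofList (scanner.map pvFy),
       PySem.Set.ofList ((PySem.Set.ofList (scanner.map pvFy)).map pvFz),
       PySem.Set.ofList ((PySem.Set.ofList ((PySem.Set.ofList (scanner.map pvFy)).map pvFz)).map pvFz),
       PySem.Set.ofList ((PySem.Set.ofList ((PySem.Set.ofList ((PySem.Set.ofList (scanner.map pvFy)).map pvFz)).map pvFz)).map pvFz),
       PySem.Set.ofList ((PySem.Set.ofList (scanner.map pvFy)).map pvFy)] =
      [scanner.map (fun p => p),
       PySem.Set.ofList (scanner.map pvFy),
       PySem.Set.ofList (scanner.map (fun p => pvFz (pvFy p))),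
       PySem.Set.ofList (scanner.map (fun p => pvFz (pvFz (pvFy p)))),
       PySem.Set.ofList (scanner.map (fun p =>
         [-(PySem.List.pyGetD p 1 0), PySem.List.pyGetD p 2 0, -(PySem.List.pyGetD p 0 0)])),
       PySem.Set.ofList (scanner.map (fun p => pvFy (pvFy p)))] := by
  have sL := pv_shape_map pvFy pv_shape_fy scanner
  have e2 := pv_collapse pvFz (scanner.map pvFy) (pv_injz _ sL)
  rw [e2]
  have sLz := pv_shape_map pvFz pv_shape_fz (scanner.map pvFy)
  have e3 := pv_collapse pvFz ((scanner.map pvFy).map pvFz) (pv_injz _ sLz)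
  rw [e3]
  have sLzz := pv_shape_map pvFz pv_shape_fz ((scanner.map pvFy).map pvFz)
  rw [pv_collapse pvFz (((scanner.map pvFy).map pvFz).map pvFz) (pv_injz _ sLzz)]
  rw [pv_collapse pvFy (scanner.map pvFy) (pv_injy _ sL)]
  simp only [List.map_map, List.cons.injEq]
  refine ⟨by simp, trivial, rfl, rfl, ?_, rfl, trivial⟩
  refine congrArg _ (List.map_congr_left fun p _ => ?_)
  show [-(PySem.List.pyGetD p 1 0), -(-(PySem.List.pyGetD p 2 0)), -(PySem.List.pyGetD p 0 0)] = _
  simp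

-- ===== VERDICT (by name: the statement is the Claim_ definition above) =====
theorem get_directions_spec : Claim_equal_get_directions := by
  intro scanner _ _
  unfold Spec_get_directions
  rw [pv_unfold_A, pv_unfold_B]
  exact pv_main scanner
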